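-- pv_equiv track=rewrite | github.com/michaelgowie/sigma-labs-precourse | Level_1/challenge_2_task_2.py | intersperse_name
-- ===== SOURCE A (Python) =====
-- def reverse_name(name=str):
--     return name[::-1]
--
-- def intersperse_name(first_name=str, surname=str):
--     reversed_first_name = reverse_name(first_name)
--     interspersed_name = ''
--     min_name_length = min([len(first_name), len(surname)])
--     for i in range(min_name_length):
--         interspersed_name += reversed_first_name[i] + surname[i]
--     if len(surname) == min_name_length:
--         interspersed_name += reversed_first_name[min_name_length:]
--     else:
--         interspersed_name += surname[min_name_length:]
--     return interspersed_name
-- ===== SOURCE B (Python) =====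
-- def intersperse_name(first_name=str, surname=str):
--     rev = first_name[::-1]
--     return ''.join(rev[i:i+1] + surname[i:i+1]
--                    for i in range(max(len(rev), len(surname))))
-- ===== Notes on version B (the rewrite author's own statement) =====
-- stated objective: simpler
-- what changed: Replaces A's min-length index loop plus separate longer-tail if/else branch by a single ''.join over one-character slices up to the max length, where slices past the shorter string are empty, so no tail handling is needed.
import Mathlib
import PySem

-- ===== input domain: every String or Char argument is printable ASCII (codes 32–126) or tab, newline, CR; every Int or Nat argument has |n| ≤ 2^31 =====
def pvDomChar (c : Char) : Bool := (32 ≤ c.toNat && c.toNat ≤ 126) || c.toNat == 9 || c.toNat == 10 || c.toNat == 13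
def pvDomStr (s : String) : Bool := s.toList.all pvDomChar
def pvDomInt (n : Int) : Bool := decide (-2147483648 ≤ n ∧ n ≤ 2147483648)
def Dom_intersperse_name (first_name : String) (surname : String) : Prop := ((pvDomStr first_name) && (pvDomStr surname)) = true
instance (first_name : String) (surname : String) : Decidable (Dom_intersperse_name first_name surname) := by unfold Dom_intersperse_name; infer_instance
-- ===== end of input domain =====

-- B replaces A's min-length loop plus separate longer-tail branch by one uniform join over
-- single-character slices up to the max length (empty beyond the shorter string); same return value.

-- ===== PORT A =====
-- helper reverse_name of A, on code points (s[::-1])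
def reverseNameChars (name : List Char) : List Char :=
  (PySem.List.slice? name none none (-1)).getD []

def intersperseChars (f s : List Char) : List Char :=
  let reversed_first_name := reverseNameChars f
  let min_name_length : Int := (PySem.List.min? [(f.length : Int), (s.length : Int)] (fun y => y)).getD 0
  let interspersed_name :=
    (PySem.List.pyRange 0 min_name_length 1).foldl
      (fun acc i => acc ++ ((PySem.List.pyGet? reversed_first_name i).toList ++ (PySem.List.pyGet? s i).toList)) []
  if (s.length : Int) = min_name_length then
    interspersed_name ++ PySem.List.slice reversed_first_name (some min_name_length) none
  else
    interspersed_name ++ PySem.List.slice s (some min_name_length) none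

def intersperse_name (first_name : String) (surname : String) : String :=
  String.ofList (intersperseChars first_name.toList surname.toList)

-- ===== PORT B =====
-- rev[i:i+1] + surname[i:i+1] joined for i in range(max(len(rev), len(surname))), on code points
def weaveChars (rev s : List Char) : List Char :=
  (PySem.List.pyRange 0 (max rev.length s.length : Nat) 1).flatMap
    (fun i => PySem.List.slice rev (some i) (some (i + 1)) ++ PySem.List.slice s (some i) (some (i + 1)))

def intersperse_name_alt (first_name : String) (surname : String) : String :=
  String.ofList (weaveChars first_name.toList.reverse surname.toList)

-- ===== PRECONDITION & SPEC =====
def Spec_intersperse_name (first_name : String) (surname : String) (out : String) : Prop := out = intersperse_name_alt first_name surname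
instance (first_name : String) (surname : String) (out : String) : Decidable (Spec_intersperse_name first_name surname out) := by unfold Spec_intersperse_name; infer_instance

-- ===== CLAIM (what is proved, stated in full; the proofs are below) =====
def Claim_equal_intersperse_name : Prop := ∀ (first_name : String) (surname : String), Dom_intersperse_name first_name surname → Spec_intersperse_name first_name surname (intersperse_name first_name surname)

-- ===== LEMMAS AND PROOFS =====

theorem pyRange_zero_nat_eq (m : Nat) : PySem.List.pyRange 0 (m : Int) 1 = (List.range m).map (fun (k : Nat) => (k : Int)) := by
  simp [PySem.List.pyRange_zero_natCast]

theorem flatMap_pyRange (m : Nat) (g : Int → List Char) :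
    (PySem.List.pyRange 0 (m : Int) 1).flatMap g = (List.range m).flatMap (fun (k : Nat) => g (k : Int)) := by
  rw [pyRange_zero_nat_eq, List.flatMap_map]

theorem A_form (f s : List Char) :
    intersperseChars f s =
      (List.range (min f.length s.length)).flatMap
          (fun k => (f.reverse)[k]?.toList ++ s[k]?.toList)
        ++ (if s.length = min f.length s.length
            then f.reverse.drop (min f.length s.length)
            else s.drop (min f.length s.length)) := by
  unfold intersperseChars reverseNameChars
  rw [PySem.List.slice?_none_none_neg_one, PySem.List.min?_id_cons]
  simp only [List.foldl_cons, List.foldl_nil, Option.getD_some]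
  rw [← Nat.cast_min]
  rw [PySem.List.foldl_append_eq_flatMap, flatMap_pyRange]
  simp only [PySem.List.pyGet?_natCast, PySem.List.slice_from_natCast,
    Nat.cast_inj, List.nil_append]
  split_ifs <;> rfl

theorem B_form (r s : List Char) :
    weaveChars r s = (List.range (max r.length s.length)).flatMap
      (fun k => r[k]?.toList ++ s[k]?.toList) := by
  unfold weaveChars
  rw [flatMap_pyRange]
  refine List.flatMap_congr ?_
  intro k _
  have h1 : ((k : Int) + 1) = ((k : Int) + ((1 : Nat) : Int)) := by norm_num
  rw [h1, PySem.List.slice_natCast_add, PySem.List.slice_natCast_add,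
    List.take_one, List.take_one, List.head?_drop, List.head?_drop]

theorem range_succ_flatMap (n : Nat) (g : Nat → List Char) :
    (List.range (n + 1)).flatMap g = g 0 ++ (List.range n).flatMap (fun k => g (k + 1)) := by
  rw [List.range_succ_eq_map, List.flatMap_cons, List.flatMap_map]

theorem self_flat (l : List Char) : (List.range l.length).flatMap (fun k => l[k]?.toList) = l := by
  induction l with
  | nil => simp
  | cons c t ih => rw [List.length_cons, range_succ_flatMap]; simp [ih]

theorem key (r s : List Char) :
    (List.range (min r.length s.length)).flatMap (fun k => r[k]?.toList ++ s[k]?.toList)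
      ++ (if s.length = min r.length s.length then r.drop (min r.length s.length) else s.drop (min r.length s.length))
    = (List.range (max r.length s.length)).flatMap (fun k => r[k]?.toList ++ s[k]?.toList) := by
  induction r generalizing s with
  | nil =>
    cases s with
    | nil => simp
    | cons y ys =>
      rw [if_neg (by simp)]
      simp only [List.length_nil, Nat.zero_min, Nat.zero_max, List.range_zero, List.flatMap_nil,
        List.drop_zero, List.nil_append, List.length_cons]
      simpa using (self_flat (y :: ys)).symm
  | cons x xs ih =>
    cases s with
    | nil =>
      rw [if_pos (by simp)]
      simp only [List.length_nil, Nat.min_zero, Nat.max_zero, List.range_zero, List.flatMap_nil,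
        List.drop_zero, List.nil_append, List.length_cons]
      simpa using (self_flat (x :: xs)).symm
    | cons y ys =>
      simp only [List.length_cons, Nat.add_min_add_right, Nat.add_max_add_right]
      rw [range_succ_flatMap, range_succ_flatMap]
      simp only [List.getElem?_cons_zero, List.getElem?_cons_succ, List.drop_succ_cons,
        Option.toList_some, Nat.add_right_cancel_iff]
      rw [List.append_assoc]
      rw [ih ys]

theorem chars_eq (f s : List Char) : intersperseChars f s = weaveChars f.reverse s := by
  rw [A_form, B_form]
  simpa using key f.reverse s

-- ===== VERDICT (by name: the statement is the Claim_ definition above) =====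
theorem intersperse_name_spec : Claim_equal_intersperse_name := by
  intro f s _
  unfold Spec_intersperse_name intersperse_name intersperse_name_alt
  rw [chars_eq]
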